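-- pv_equiv track=rewrite | github.com/rajendrapandey95/HackerEarth | 2024/January/6-1-24.py | solve
-- ===== SOURCE A (Python) =====
-- from collections import defaultdict
--
-- def solve(N, wealth):
--     m = defaultdict(int)
--     ans = 0
--     po = [1] + [3 ** i for i in range(1, 21)]
--
--     for it in wealth:
--         m[it] += 1
--         for i in range(1, 21):
--             ans += m[po[i] - it]
--
--     return ans
-- ===== SOURCE B (Python) =====
-- def solve(N, wealth):
--     # Direct pair scan: for each new element, test its sum with every previously
--     # seen element against a precomputed set of the 20 powers of 3 (3^1..3^20).
--     powers = {3 ** i for i in range(1, 21)}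
--     ans = 0
--     seen = []
--     for x in wealth:
--         for y in seen:
--             if x + y in powers:
--                 ans += 1
--         seen.append(x)
--     return ans
-- ===== Notes on version B (the rewrite author's own statement) =====
-- stated objective: alternative
-- what changed: Replaces A's running frequency dictionary (queried at the 20 values 3^i - x for each element) with a direct scan of the previously seen elements, testing each pair sum for membership in a precomputed set of powers of 3.
import Mathlib
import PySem

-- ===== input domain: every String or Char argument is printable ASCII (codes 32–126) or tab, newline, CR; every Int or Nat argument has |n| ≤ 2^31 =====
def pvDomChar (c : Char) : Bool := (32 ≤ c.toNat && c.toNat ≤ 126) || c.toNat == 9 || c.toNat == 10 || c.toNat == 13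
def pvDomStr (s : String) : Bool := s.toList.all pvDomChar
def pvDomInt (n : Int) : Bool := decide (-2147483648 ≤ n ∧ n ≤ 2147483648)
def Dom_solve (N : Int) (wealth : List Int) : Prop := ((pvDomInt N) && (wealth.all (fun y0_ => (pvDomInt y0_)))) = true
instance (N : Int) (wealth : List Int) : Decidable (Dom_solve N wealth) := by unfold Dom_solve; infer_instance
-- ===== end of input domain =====

-- B replaces A's running frequency dictionary (queried at 3^i - x for each element)
-- with a direct scan of previously seen elements against a precomputed set of powers of 3
-- (alternative decomposition; not claimed faster).


-- ===== PORT A =====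
-- po = [1] + [3 ** i for i in range(1, 21)]
def poA : List Int := [1] ++ (PySem.List.pyRange 1 21 1).map (fun i => (3 : Int) ^ i.toNat)

-- loop body of A: m[it] += 1; for i in range(1, 21): ans += m[po[i] - it]
-- (defaultdict reads are getD … 0; the defaultdict's silent insertion of a 0 entry on a
-- missing-key read changes no getD value and the dict is never iterated, so it is value-exact;
-- the index po[i] is always in range since len(po) = 21)
def stepA (st : PySem.Dict Int Int × Int) (it : Int) : PySem.Dict Int Int × Int :=
  let m := st.1.modify it 0 (· + 1)
  (m, (PySem.List.pyRange 1 21 1).foldl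
        (fun a i => a + m.getD (PySem.List.pyGetD poA i 0 - it) 0) st.2)

def solve (N : Int) (wealth : List Int) : Int :=
  (wealth.foldl stepA (PySem.Dict.empty, 0)).2

-- ===== PORT B =====
-- powers = {3 ** i for i in range(1, 21)}
def powsB : List Int := (PySem.List.pyRange 1 21 1).map (fun i => (3 : Int) ^ i.toNat)
def powersB : PySem.Set Int := PySem.Set.ofList powsB

-- loop body of B: for y in seen: if x + y in powers: ans += 1; seen.append(x)
def stepB (st : Int × List Int) (x : Int) : Int × List Int :=
  (st.2.foldl (fun a y => if PySem.Set.contains powersB (x + y) then a + 1 else a) st.1,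
   st.2 ++ [x])

def solve_alt (N : Int) (wealth : List Int) : Int :=
  (wealth.foldl stepB (0, [])).1

-- ===== PRECONDITION & SPEC =====
def Spec_solve (N : Int) (wealth : List Int) (out : Int) : Prop := out = solve_alt N wealth
instance (N : Int) (wealth : List Int) (out : Int) : Decidable (Spec_solve N wealth out) := by unfold Spec_solve; infer_instance

-- ===== CLAIM (what is proved, stated in full; the proofs are below) =====
def Claim_equal_solve : Prop := ∀ (N : Int) (wealth : List Int), Dom_solve N wealth → Spec_solve N wealth (solve N wealth)

-- ===== LEMMAS AND PROOFS =====

-- the common semantic value: pair contributions accumulated left to right over the list,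
-- with p the already-processed prefix
def T (p l : List Int) : Int :=
  match l with
  | [] => 0
  | x :: r => (p.countP (fun y => powsB.contains (x + y)) : Int) + T (p ++ [x]) r

theorem powsB_nodup : powsB.Nodup := by decide

theorem powsB_odd : ∀ P ∈ powsB, P % 2 = 1 := by decide

theorem sum_ite_eq_contains (l : List Int) (hl : l.Nodup) (s : Int) :
    (l.map (fun P => if P = s then (1 : Int) else 0)).sum
      = if l.contains s then 1 else 0 := by
  induction l with
  | nil => simp
  | cons P t ih =>
    rcases List.nodup_cons.mp hl with ⟨hP, ht⟩
    by_cases h : P = s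
    · subst h
      have hc : t.contains P = false := by simpa using hP
      simp [ih ht]
      exact hP
    · simp [h, ih ht, Ne.symm h]

theorem odd_sum_zero (x : Int) :
    (powsB.map (fun P => if x = P - x then (1 : Int) else 0)).sum = 0 := by
  apply List.sum_eq_zero
  intro a ha
  rcases List.mem_map.mp ha with ⟨P, hP, rfl⟩
  have hodd := powsB_odd P hP
  have : x ≠ P - x := by omega
  simp [this]

theorem count_sum (p : List Int) (x : Int) :
    (powsB.map (fun P => ((p.count (P - x)) : Int))).sum
      = (p.countP (fun y => powsB.contains (x + y)) : Int) := by
  induction p with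
  | nil => simp
  | cons y t ih =>
    have hsplit : (powsB.map (fun P => ((( y :: t).count (P - x)) : Int))).sum
        = (powsB.map (fun P => ((t.count (P - x)) : Int))).sum
          + (powsB.map (fun P => if P = x + y then (1 : Int) else 0)).sum := by
      rw [← List.sum_map_add]
      apply congrArg List.sum
      apply List.map_congr_left
      intro P _
      rw [List.count_cons]
      by_cases h : P = x + y
      · have hy : (y == (P - x)) = true := by simp; omega
        simp only [hy, if_pos h, if_true]
        push_cast; ring
      · have hy : (y == (P - x)) = false := by simp; omega
        simp only [hy, if_neg h]
        push_cast; ring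
    rw [hsplit, ih, sum_ite_eq_contains powsB powsB_nodup (x + y)]
    by_cases h : powsB.contains (x + y)
    · simp only [List.countP_cons, h]
      push_cast; ring
    · simp only [List.countP_cons, h]
      push_cast; simp

theorem step_eq (p : List Int) (x : Int) :
    (powsB.map (fun P => (((p ++ [x]).count (P - x)) : Int))).sum
      = (p.countP (fun y => powsB.contains (x + y)) : Int) := by
  have hsplit : (powsB.map (fun P => (((p ++ [x]).count (P - x)) : Int))).sum
      = (powsB.map (fun P => ((p.count (P - x)) : Int))).sum
        + (powsB.map (fun P => if x = P - x then (1 : Int) else 0)).sum := by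
    rw [← List.sum_map_add]
    apply congrArg List.sum
    apply List.map_congr_left
    intro P _
    by_cases h : x = P - x
    · simp [List.count_append, ← h]
    · rw [List.count_append, if_neg h]
      have hy : ((P - x) == x) = false := by simp; omega
      simp [List.count_cons]
      omega
  rw [hsplit, odd_sum_zero, count_sum]
  simp

-- A's inner loop, rewritten as a sum over the powers
theorem innerA (m : PySem.Dict Int Int) (a x : Int) :
    (PySem.List.pyRange 1 21 1).foldl
        (fun a i => a + m.getD (PySem.List.pyGetD poA i 0 - x) 0) a
      = a + (powsB.map (fun P => m.getD (P - x) 0)).sum := by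
  rw [PySem.List.foldl_add]
  congr 1

theorem foldA (l p : List Int) (m : PySem.Dict Int Int) (ans : Int)
    (hm : ∀ k, m.getD k 0 = (p.count k : Int)) :
    (l.foldl stepA (m, ans)).2 = ans + T p l := by
  induction l generalizing p m ans with
  | nil => simp [T]
  | cons x r ih =>
    have hm' : ∀ k, (m.modify x 0 (· + 1)).getD k 0 = ((p ++ [x]).count k : Int) := by
      intro k
      rw [PySem.Dict.getD_modify]
      by_cases h : k = x
      · simp [h, hm, List.count_append]
      · simp [h, hm, List.count_append, Ne.symm h]
    have hsum : (powsB.map (fun P => (m.modify x 0 (· + 1)).getD (P - x) 0)).sum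
        = (p.countP (fun y => powsB.contains (x + y)) : Int) := by
      rw [← step_eq p x]
      apply congrArg List.sum
      apply List.map_congr_left
      intro P _
      exact hm' (P - x)
    show ((r.foldl stepA (stepA (m, ans) x)).2 = _)
    rw [show stepA (m, ans) x
        = (m.modify x 0 (· + 1),
           (PySem.List.pyRange 1 21 1).foldl
             (fun a i => a + (m.modify x 0 (· + 1)).getD (PySem.List.pyGetD poA i 0 - x) 0)
             ans) from rfl]
    rw [ih (p ++ [x]) _ _ hm', innerA, hsum, T]
    ring

theorem foldB (l p : List Int) (ans : Int) :
    (l.foldl stepB (ans, p)).1 = ans + T p l := by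
  induction l generalizing p ans with
  | nil => simp [T]
  | cons x r ih =>
    show ((r.foldl stepB (stepB (ans, p) x)).1 = _)
    rw [show stepB (ans, p) x
        = (p.foldl (fun a y => if PySem.Set.contains powersB (x + y) then a + 1 else a) ans,
           p ++ [x]) from rfl]
    rw [ih (p ++ [x])]
    have hcont : ∀ z, PySem.Set.contains powersB z = powsB.contains z := by
      intro z
      simp [powersB, PySem.Set.mem_ofList]
    have : p.foldl (fun a y => if PySem.Set.contains powersB (x + y) then a + 1 else a) ans
        = ans + (p.countP (fun y => powsB.contains (x + y)) : Int) := by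
      simp only [hcont]
      exact PySem.List.foldl_if_add_one _ _ _
    rw [this, T]
    ring

-- ===== VERDICT (by name: the statement is the Claim_ definition above) =====
theorem solve_spec : Claim_equal_solve := by
  intro N wealth _
  unfold Spec_solve solve solve_alt
  rw [foldA wealth [] PySem.Dict.empty 0 (by intro k; simp),
      foldB wealth [] 0]
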